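-- pv_equiv track=rewrite | github.com/pypi-data/pypi-mirror-94 | packages/pyhasse.core/pyhasse.core-0.2.3.tar.gz/pyhasse.core-0.2.3/src/pyhasse/core/tables.py | convert_field2matrix
-- ===== SOURCE A (Python) =====
-- def convert_field2matrix(field, placeholder="na"):
--     """Converts a field into a regular matrix structure
--     :var field: input field with different lenghts of rows
--     :var placeholder: to get a regular structure
--                       not available data are filled with
--                       placeholder"""
--     lenField = len(field)
--     maxLines = 0
--     for i in range(0, lenField):
--         if len(field[i]) >= maxLines:
--             maxLines = len(field[i])
--     matrix = []
--     for i in range(0, lenField):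
--         matrix.append(0)
--         matrix[i] = []
--         for j in range(0, maxLines):
--             if j < len(field[i]):
--                 matrix[i].append(field[i][j])
--             else:
--                 matrix[i].append(placeholder)
--     return matrix, lenField, maxLines
-- ===== SOURCE B (Python) =====
-- def convert_field2matrix(field, placeholder="na"):
--     maxLines = max(map(len, field), default=0)
--     matrix = [row + [placeholder] * (maxLines - len(row)) for row in field]
--     return matrix, len(field), maxLines
-- ===== Notes on version B (the rewrite author's own statement) =====
-- stated objective: simpler
-- what changed: Replaces the two index-driven loops with a per-cell append branch by a single max over row lengths plus per-row padding via list repetition (row + [placeholder]*(maxLines-len(row))).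
import Mathlib
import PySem

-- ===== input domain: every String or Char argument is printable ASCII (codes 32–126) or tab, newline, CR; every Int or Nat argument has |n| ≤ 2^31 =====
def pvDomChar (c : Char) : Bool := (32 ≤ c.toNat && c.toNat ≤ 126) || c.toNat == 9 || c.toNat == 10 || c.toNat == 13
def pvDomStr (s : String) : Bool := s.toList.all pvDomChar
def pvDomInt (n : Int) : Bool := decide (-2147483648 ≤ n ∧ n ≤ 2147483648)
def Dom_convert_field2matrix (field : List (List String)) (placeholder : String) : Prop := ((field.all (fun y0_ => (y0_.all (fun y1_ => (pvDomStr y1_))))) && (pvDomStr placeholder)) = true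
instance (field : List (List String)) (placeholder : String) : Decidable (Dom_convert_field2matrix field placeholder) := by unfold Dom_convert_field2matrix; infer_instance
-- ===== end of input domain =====

-- B pads each row in one step (max over row lengths, then row + placeholder*k) instead of
-- A's index loops with a per-cell branch; objective: simpler.

-- ===== PORT A =====
-- Literal port of A: loop over range(lenField) to find maxLines, then build each row
-- cell by cell with a j-loop and an in-range branch (field[i] accessed via getD; every
-- index the loops produce is in range, matching Python's field[i]/field[i][j]).
def convert_field2matrix (field : List (List String)) (placeholder : String) : List (List String) × Int × Int :=
  let lenField := field.length
  let maxLines := (List.range lenField).foldl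
    (fun m i => if (field.getD i []).length ≥ m then (field.getD i []).length else m) 0
  let matrix := (List.range lenField).foldl
    (fun mat i =>
      mat ++ [(List.range maxLines).foldl
        (fun row j => if j < (field.getD i []).length
                      then row ++ [(field.getD i []).getD j ""]
                      else row ++ [placeholder]) []]) []
  (matrix, (lenField : Int), (maxLines : Int))

-- ===== PORT B =====
-- Port of B: max over the row lengths, then pad each row with replicate.
def convert_field2matrix_alt (field : List (List String)) (placeholder : String) : List (List String) × Int × Int :=
  let maxLines := (field.map List.length).foldl max 0
  let matrix := field.map (fun row => row ++ List.replicate (maxLines - row.length) placeholder)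
  (matrix, (field.length : Int), (maxLines : Int))

-- ===== PRECONDITION & SPEC =====
def Spec_convert_field2matrix (field : List (List String)) (placeholder : String) (out : List (List String) × Int × Int) : Prop := out = convert_field2matrix_alt field placeholder
instance (field : List (List String)) (placeholder : String) (out : List (List String) × Int × Int) : Decidable (Spec_convert_field2matrix field placeholder out) := by unfold Spec_convert_field2matrix; infer_instance

-- ===== CLAIM (what is proved, stated in full; the proofs are below) =====
def Claim_equal_convert_field2matrix : Prop := ∀ (field : List (List String)) (placeholder : String), Dom_convert_field2matrix field placeholder → Spec_convert_field2matrix field placeholder (convert_field2matrix field placeholder)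

-- ===== LEMMAS AND PROOFS =====

-- ===== VERDICT (by name: the statement is the Claim_ definition above) =====
-- fold over range of indices = fold over the list itself
theorem foldl_range_getD {α β : Type} (xs : List α) (f : β → α → β) (init : β) (d : α) :
    (List.range xs.length).foldl (fun b i => f b (xs.getD i d)) init = xs.foldl f init := by
  induction xs generalizing init with
  | nil => simp
  | cons x xs ih =>
    simp only [List.length_cons, List.range_succ_eq_map, List.foldl_cons, List.foldl_map,
      List.getD_cons_zero, List.getD_cons_succ]
    exact ih (f init x)

theorem init_le_foldl_max (l : List Nat) (init : Nat) : init ≤ l.foldl max init := by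
  induction l generalizing init with
  | nil => simp
  | cons x xs ih => exact le_trans (le_max_left _ _) (ih _)

theorem mem_le_foldl_max (l : List Nat) (init : Nat) : ∀ a ∈ l, a ≤ l.foldl max init := by
  induction l generalizing init with
  | nil => simp
  | cons x xs ih =>
    intro a ha
    rcases List.mem_cons.1 ha with h | h
    · subst h; exact le_trans (le_max_right _ _) (init_le_foldl_max _ _)
    · exact ih _ a h

theorem row_fold (l : List String) (p : String) (M : Nat) :
    (List.range M).foldl
        (fun row j => if j < l.length then row ++ [l.getD j ""] else row ++ [p]) []
      = l.take M ++ List.replicate (M - l.length) p := by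
  induction M with
  | zero => simp
  | succ M ih =>
    rw [List.range_succ, List.foldl_append, ih]
    simp only [List.foldl_cons, List.foldl_nil]
    by_cases h : M < l.length
    · have h0 : M - l.length = 0 := by omega
      have h1 : (M + 1) - l.length = 0 := by omega
      have hg : l.getD M "" = l[M] := by
        simp [List.getD_eq_getElem?_getD, List.getElem?_eq_getElem h]
      rw [if_pos h, hg, h0, h1, List.take_add_one]
      simp [List.getElem?_eq_getElem h]
    · have h1 : (M + 1) - l.length = (M - l.length) + 1 := by omega
      have h2 : l.take M = l := List.take_of_length_le (by omega)
      have h3 : l.take (M + 1) = l := List.take_of_length_le (by omega)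
      simp [h, h1, h2, h3, List.replicate_succ']

theorem foldl_append_singleton {α β : Type} (xs : List α) (g : α → β) (init : List β) :
    xs.foldl (fun acc x => acc ++ [g x]) init = init ++ xs.map g := by
  induction xs generalizing init with
  | nil => simp
  | cons x xs ih => simp [ih]

-- ===== VERDICT (by name: the statement is the Claim_ definition above) =====
theorem convert_field2matrix_spec : Claim_equal_convert_field2matrix := by
  intro field placeholder _
  simp only [Spec_convert_field2matrix, convert_field2matrix, convert_field2matrix_alt]
  have hmax :
      (List.range field.length).foldl
          (fun m i => if (field.getD i []).length ≥ m then (field.getD i []).length else m) 0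
        = (field.map List.length).foldl max 0 := by
    rw [foldl_range_getD field (fun m row => if row.length ≥ m then row.length else m) 0 [],
        List.foldl_map]
    rfl
  rw [hmax]
  set M := (field.map List.length).foldl max 0 with hM
  have hmat :
      (List.range field.length).foldl
          (fun mat i =>
            mat ++ [(List.range M).foldl
              (fun row j => if j < (field.getD i []).length
                            then row ++ [(field.getD i []).getD j ""]
                            else row ++ [placeholder]) []]) []
        = field.map (fun row => row ++ List.replicate (M - row.length) placeholder) := by
    rw [foldl_range_getD field
        (fun mat row =>
          mat ++ [(List.range M).foldl
            (fun r j => if j < row.length then r ++ [row.getD j ""] else r ++ [placeholder]) []])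
        [] [],
      foldl_append_singleton]
    simp only [List.nil_append]
    apply List.map_congr_left
    intro row hrow
    rw [row_fold]
    have hle : row.length ≤ M :=
      mem_le_foldl_max _ 0 _ (List.mem_map.2 ⟨row, hrow, rfl⟩)
    rw [List.take_of_length_le hle]
  rw [hmat]
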